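-- pv_equiv track=rewrite | github.com/akmiller01/multi-dimensional-nlp-blog | code/download_datastore_api.py | parse_policy_markers
-- ===== SOURCE A (Python) =====
-- policy_marker_codelist = {
--     '1': 'gender_equality',
--     '2': 'environment',
--     '3': 'pdgg',
--     '4': 'trade',
--     '5': 'bio_diversity',
--     '6': 'climate_mitigation',
--     '7': 'climate_adaptation',
--     '8': 'desertification',
--     '9': 'rmnch',
--     '10': 'drr',
--     '11': 'disability',
--     '12': 'nutrition'
-- }
--
-- def parse_policy_markers(policy_marker_codes, policy_marker_significances, non_oecd_vocabulary_indices):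
--     results = {'{}_sig'.format(marker_name): '0' for marker_name in policy_marker_codelist.values()}
--     # Sense check
--     if len(policy_marker_codes) == len(policy_marker_significances):
--         for marker_code, marker_name in policy_marker_codelist.items():
--             if marker_code in policy_marker_codes:
--                 marker_index = policy_marker_codes.index(marker_code)
--                 if marker_index not in non_oecd_vocabulary_indices:
--                     marker_sig = policy_marker_significances[marker_index]
--                     results['{}_sig'.format(marker_name)] = marker_sig
--     return results
-- ===== SOURCE B (Python) =====
-- policy_marker_codelist = {
--     '1': 'gender_equality',
--     '2': 'environment',
--     '3': 'pdgg',
--     '4': 'trade',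
--     '5': 'bio_diversity',
--     '6': 'climate_mitigation',
--     '7': 'climate_adaptation',
--     '8': 'desertification',
--     '9': 'rmnch',
--     '10': 'drr',
--     '11': 'disability',
--     '12': 'nutrition'
-- }
--
-- def parse_policy_markers(policy_marker_codes, policy_marker_significances, non_oecd_vocabulary_indices):
--     results = {'{}_sig'.format(name): '0' for name in policy_marker_codelist.values()}
--     # Sense check
--     if len(policy_marker_codes) == len(policy_marker_significances):
--         seen = set()
--         for index, code in enumerate(policy_marker_codes):
--             if code in seen:
--                 continue
--             seen.add(code)
--             name = policy_marker_codelist.get(code)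
--             if name is not None and index not in non_oecd_vocabulary_indices:
--                 results['{}_sig'.format(name)] = policy_marker_significances[index]
--     return results
-- ===== Notes on version B (the rewrite author's own statement) =====
-- stated objective: idiomatic
-- what changed: Replaces the 12 per-marker membership tests plus list.index scans over the input with a single pass over enumerate(policy_marker_codes) guarded by a seen-set (first occurrence only) and one dict lookup per code.
import Mathlib
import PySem

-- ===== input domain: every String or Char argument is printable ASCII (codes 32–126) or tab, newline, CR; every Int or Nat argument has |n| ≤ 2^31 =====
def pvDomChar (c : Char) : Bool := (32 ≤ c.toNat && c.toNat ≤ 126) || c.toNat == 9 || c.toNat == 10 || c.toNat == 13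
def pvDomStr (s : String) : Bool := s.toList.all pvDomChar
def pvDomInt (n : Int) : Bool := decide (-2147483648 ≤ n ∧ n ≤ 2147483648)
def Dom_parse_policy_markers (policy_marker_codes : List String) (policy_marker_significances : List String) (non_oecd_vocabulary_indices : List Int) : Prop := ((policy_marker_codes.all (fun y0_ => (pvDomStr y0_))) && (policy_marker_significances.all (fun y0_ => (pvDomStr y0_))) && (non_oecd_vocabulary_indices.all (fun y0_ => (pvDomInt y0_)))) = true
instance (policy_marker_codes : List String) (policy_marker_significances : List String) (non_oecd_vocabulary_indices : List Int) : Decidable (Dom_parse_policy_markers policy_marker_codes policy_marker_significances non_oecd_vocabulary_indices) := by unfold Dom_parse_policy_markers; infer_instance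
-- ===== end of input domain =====

-- B replaces A's 12 per-marker membership + .index scans with a single seen-set pass over enumerate(codes).


-- the module-level constant policy_marker_codelist (a dict literal), as its item list
def pvCodelist : List (String × String) :=
  [("1", "gender_equality"), ("2", "environment"), ("3", "pdgg"), ("4", "trade"),
   ("5", "bio_diversity"), ("6", "climate_mitigation"), ("7", "climate_adaptation"),
   ("8", "desertification"), ("9", "rmnch"), ("10", "drr"), ("11", "disability"),
   ("12", "nutrition")]

-- ===== PORT A =====
-- literal port of A: default dict, then for each codelist item a membership test,
-- a .index scan and an exclusion test.  The 'none' branch of the match is unreachable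
-- (guarded by p.1 ∈ codes, where Python's .index cannot raise).
def parse_policy_markers (policy_marker_codes : List String) (policy_marker_significances : List String) (non_oecd_vocabulary_indices : List Int) : List (String × String) :=
  let results : PySem.Dict String String :=
    pvCodelist.foldl (fun d p => d.insert (p.2 ++ "_sig") "0") PySem.Dict.empty
  let results :=
    if policy_marker_codes.length = policy_marker_significances.length then
      pvCodelist.foldl (fun d p =>
        if p.1 ∈ policy_marker_codes then
          match PySem.List.index? policy_marker_codes p.1 with
          | some marker_index =>
            if (marker_index : Int) ∈ non_oecd_vocabulary_indices then d
            else d.insert (p.2 ++ "_sig")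
              ((PySem.List.pyGet? policy_marker_significances (marker_index : Int)).getD "0")
          | none => d
        else d) results
    else results
  results.items

-- ===== PORT B =====
-- literal port of B: one pass over enumerate(codes) with a seen set and a dict lookup.
-- The .getD "0" default of pyGet? is unreachable (index < len(codes) = len(sigs)).
def parse_policy_markers_alt (policy_marker_codes : List String) (policy_marker_significances : List String) (non_oecd_vocabulary_indices : List Int) : List (String × String) :=
  let results : PySem.Dict String String :=
    pvCodelist.foldl (fun d p => d.insert (p.2 ++ "_sig") "0") PySem.Dict.empty
  let cl : PySem.Dict String String := PySem.Dict.ofList pvCodelist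
  if policy_marker_codes.length = policy_marker_significances.length then
    (((PySem.List.enumerate policy_marker_codes 0).foldl (fun st ic =>
        if PySem.Set.contains st.1 ic.2 then st
        else
          let seen := PySem.Set.add st.1 ic.2
          match cl.get? ic.2 with
          | some name =>
            if ic.1 ∈ non_oecd_vocabulary_indices then (seen, st.2)
            else (seen, st.2.insert (name ++ "_sig")
              ((PySem.List.pyGet? policy_marker_significances ic.1).getD "0"))
          | none => (seen, st.2)) ((PySem.Set.empty : PySem.Set String), results)).2).items
  else results.items

-- ===== PRECONDITION & SPEC =====
def Spec_parse_policy_markers (policy_marker_codes : List String) (policy_marker_significances : List String) (non_oecd_vocabulary_indices : List Int) (out : List (String × String)) : Prop := out = parse_policy_markers_alt policy_marker_codes policy_marker_significances non_oecd_vocabulary_indices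
instance (policy_marker_codes : List String) (policy_marker_significances : List String) (non_oecd_vocabulary_indices : List Int) (out : List (String × String)) : Decidable (Spec_parse_policy_markers policy_marker_codes policy_marker_significances non_oecd_vocabulary_indices out) := by unfold Spec_parse_policy_markers; infer_instance

-- ===== CLAIM (what is proved, stated in full; the proofs are below) =====
def Claim_equal_parse_policy_markers : Prop := ∀ (policy_marker_codes : List String) (policy_marker_significances : List String) (non_oecd_vocabulary_indices : List Int), Dom_parse_policy_markers policy_marker_codes policy_marker_significances non_oecd_vocabulary_indices → Spec_parse_policy_markers policy_marker_codes policy_marker_significances non_oecd_vocabulary_indices (parse_policy_markers policy_marker_codes policy_marker_significances non_oecd_vocabulary_indices)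

-- ===== LEMMAS AND PROOFS =====

-- the key under which a codelist entry is stored
def pvKey (p : String × String) : String := p.2 ++ "_sig"

-- value a single A-iteration for entry q leaves at key q, starting from value function w
def pvVal (codes sigs : List String) (non : List Int) (w : String × String → String) (q : String × String) : String :=
  match PySem.List.index? codes q.1 with
  | none => w q
  | some i => if (i : Int) ∈ non then w q else (PySem.List.pyGet? sigs (i : Int)).getD "0"

-- value B's pass over (enumerate rest s) with seen-set `seen` leaves at key q
def pvValB (sigs : List String) (non : List Int) (s : Int) (rest : List String) (seen : PySem.Set String) (w : String × String → String) (q : String × String) : String :=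
  if PySem.Set.contains seen q.1 then w q
  else
    match PySem.List.index? rest q.1 with
    | none => w q
    | some j => if s + (j : Int) ∈ non then w q else (PySem.List.pyGet? sigs (s + (j : Int))).getD "0"

lemma pvVal_some {codes sigs : List String} {non : List Int} {w : String × String → String}
    {q : String × String} {i : Nat} (h : PySem.List.index? codes q.1 = some i) :
    pvVal codes sigs non w q
      = if (i : Int) ∈ non then w q else (PySem.List.pyGet? sigs (i : Int)).getD "0" := by
  simp only [pvVal, h]

lemma pvVal_none {codes sigs : List String} {non : List Int} {w : String × String → String}
    {q : String × String} (h : PySem.List.index? codes q.1 = none) :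
    pvVal codes sigs non w q = w q := by
  simp only [pvVal, h]

lemma pvKey_inj : ∀ p ∈ pvCodelist, ∀ q ∈ pvCodelist, pvKey p = pvKey q → p = q := by decide

lemma pvFst_inj : ∀ p ∈ pvCodelist, ∀ q ∈ pvCodelist, p.1 = q.1 → p = q := by decide

lemma pvCl_get (x : String) (name : String) :
    (PySem.Dict.ofList pvCodelist : PySem.Dict String String).get? x = some name → (x, name) ∈ pvCodelist := by
  intro h
  have := PySem.Dict.mem_items_of_get?_eq_some _ h
  simpa using this

lemma pvCl_get_of_mem {p : String × String} (hp : p ∈ pvCodelist) :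
    (PySem.Dict.ofList pvCodelist : PySem.Dict String String).get? p.1 = some p.2 := by
  apply PySem.Dict.get?_of_mem_items
  · simpa using hp
  · decide

-- inserting at the key of a member entry rewrites exactly that entry
lemma pvInsert_items (codes sigs : List String) (non : List Int) (w : String × String → String)
    (d : PySem.Dict String String)
    (hd : d.items = pvCodelist.map (fun q => (pvKey q, w q)))
    {p : String × String} (hp : p ∈ pvCodelist) (v : String) :
    (d.insert (pvKey p) v).items
      = pvCodelist.map (fun q => (pvKey q, if q = p then v else w q)) := by
  have hc : d.contains (pvKey p) = true := by
    rw [PySem.Dict.contains_iff_mem_keys]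
    simp only [PySem.Dict.keys, hd, List.map_map]
    exact List.mem_map.2 ⟨p, hp, rfl⟩
  rw [PySem.Dict.items_insert_of_contains _ _ hc, hd, List.map_map]
  apply List.map_congr_left
  intro q hq
  by_cases hqp : q = p
  · subst hqp; simp
  · have : pvKey q ≠ pvKey p := fun h => hqp (pvKey_inj q hq p hp h)
    simp [Function.comp, this, hqp]

lemma pvValB_seen {sigs : List String} {non : List Int} {s : Int} {rest : List String}
    {seen : PySem.Set String} {w : String × String → String} {q : String × String}
    (h : PySem.Set.contains seen q.1 = true) :
    pvValB sigs non s rest seen w q = w q := by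
  simp only [pvValB, h, if_true]

lemma pvValB_unseen_none {sigs : List String} {non : List Int} {s : Int} {rest : List String}
    {seen : PySem.Set String} {w : String × String → String} {q : String × String}
    (h : ¬ PySem.Set.contains seen q.1 = true) (hidx : PySem.List.index? rest q.1 = none) :
    pvValB sigs non s rest seen w q = w q := by
  simp only [pvValB, h, Bool.false_eq_true, if_false, hidx]

lemma pvValB_unseen_some {sigs : List String} {non : List Int} {s : Int} {rest : List String}
    {seen : PySem.Set String} {w : String × String → String} {q : String × String} {j : Nat}
    (h : ¬ PySem.Set.contains seen q.1 = true) (hidx : PySem.List.index? rest q.1 = some j) :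
    pvValB sigs non s rest seen w q
      = if s + (j : Int) ∈ non then w q else (PySem.List.pyGet? sigs (s + (j : Int))).getD "0" := by
  simp only [pvValB, h, Bool.false_eq_true, if_false, hidx]

lemma pvContains_add (s : PySem.Set String) (x y : String) :
    PySem.Set.contains (PySem.Set.add s x) y = (PySem.Set.contains s y || y == x) := by
  unfold PySem.Set.add PySem.Set.contains
  split_ifs with h
  · by_cases hyx : y = x
    · subst hyx; simp_all
    · simp [hyx]
  · by_cases hyx : y = x
    · subst hyx; simp
    · simp [hyx]

-- two pvValB's agree when the seen-flags and base values agree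
lemma pvValB_congr_seen (sigs : List String) (non : List Int) (s : Int) (rest : List String)
    (seen seen' : PySem.Set String) (w : String × String → String) (q : String × String)
    (h : PySem.Set.contains seen q.1 = PySem.Set.contains seen' q.1) :
    pvValB sigs non s rest seen w q = pvValB sigs non s rest seen' w q := by
  simp only [pvValB, h]

lemma pvValB_congr_w (sigs : List String) (non : List Int) (s : Int) (rest : List String)
    (seen : PySem.Set String) (w w' : String × String → String) (q : String × String)
    (h : w q = w' q) :
    pvValB sigs non s rest seen w q = pvValB sigs non s rest seen w' q := by
  simp only [pvValB, h]

-- stepping past an element different from q.1 shifts the start index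
lemma pvValB_cons_ne (sigs : List String) (non : List Int) (s : Int) (x : String)
    (rest : List String) (seen : PySem.Set String) (w : String × String → String)
    (q : String × String) (hqx : q.1 ≠ x) :
    pvValB sigs non s (x :: rest) seen w q = pvValB sigs non (s + 1) rest seen w q := by
  by_cases hq1 : PySem.Set.contains seen q.1 = true
  · rw [pvValB_seen hq1, pvValB_seen hq1]
  · rw [show pvValB sigs non s (x :: rest) seen w q =
        match PySem.List.index? (x :: rest) q.1 with
        | none => w q
        | some j => if s + (j : Int) ∈ non then w q
            else (PySem.List.pyGet? sigs (s + (j : Int))).getD "0" from by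
      simp only [pvValB, hq1, Bool.false_eq_true, if_false]]
    rw [PySem.List.index?_cons_of_ne rest (Ne.symm hqx)]
    cases hidx : PySem.List.index? rest q.1 with
    | none => simp only [Option.map_none]; exact (pvValB_unseen_none hq1 hidx).symm
    | some j =>
      simp only [Option.map_some]
      rw [pvValB_unseen_some hq1 hidx]
      have hcast : s + ((j + 1 : Nat) : Int) = (s + 1) + (j : Int) := by push_cast; ring
      rw [hcast]

-- A's loop over a sub-collection l of the codelist
lemma pvA_loop (codes sigs : List String) (non : List Int) :
    ∀ (l : List (String × String)) (w : String × String → String) (d : PySem.Dict String String),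
    (∀ p ∈ l, p ∈ pvCodelist) →
    d.items = pvCodelist.map (fun q => (pvKey q, w q)) →
    (l.foldl (fun d p =>
        if p.1 ∈ codes then
          match PySem.List.index? codes p.1 with
          | some marker_index =>
            if (marker_index : Int) ∈ non then d
            else d.insert (p.2 ++ "_sig") ((PySem.List.pyGet? sigs (marker_index : Int)).getD "0")
          | none => d
        else d) d).items
      = pvCodelist.map (fun q => (pvKey q, if q ∈ l then pvVal codes sigs non w q else w q)) := by
  intro l
  induction l with
  | nil => intro w d _ hd; simpa using hd
  | cons p l ih =>
    intro w d hl hd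
    have hp : p ∈ pvCodelist := hl p (List.mem_cons_self ..)
    -- the dict after processing p has value function w1
    set w1 : String × String → String := fun q => if q = p then pvVal codes sigs non w q else w q with hw1
    have hstep :
        (if p.1 ∈ codes then
          match PySem.List.index? codes p.1 with
          | some marker_index =>
            if (marker_index : Int) ∈ non then d
            else d.insert (p.2 ++ "_sig") ((PySem.List.pyGet? sigs (marker_index : Int)).getD "0")
          | none => d
        else d).items = pvCodelist.map (fun q => (pvKey q, w1 q)) := by
      by_cases hmem : p.1 ∈ codes
      · cases hidx : PySem.List.index? codes p.1 with
        | none =>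
          exact absurd ((PySem.List.index?_eq_none_iff ..).1 hidx) (by simpa using hmem)
        | some i =>
          by_cases hnon : (i : Int) ∈ non
          · simp only [hmem, if_true, hidx, hnon, if_pos]
            rw [hd]; apply List.map_congr_left; intro q hq
            by_cases hqp : q = p
            · subst hqp; simp [hw1, pvVal_some hidx, hnon]
            · simp [hw1, hqp]
          · simp only [hmem, if_true, hidx, hnon, if_neg, not_false_iff]
            have := pvInsert_items codes sigs non w d hd hp
              ((PySem.List.pyGet? sigs (i : Int)).getD "0")
            rw [show p.2 ++ "_sig" = pvKey p from rfl, this]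
            apply List.map_congr_left; intro q hq
            by_cases hqp : q = p
            · subst hqp; simp [hw1, pvVal_some hidx, hnon]
            · simp [hw1, hqp]
      · simp only [hmem, if_false]
        rw [hd]; apply List.map_congr_left; intro q hq
        by_cases hqp : q = p
        · subst hqp
          have hidx : PySem.List.index? codes q.1 = none :=
            (PySem.List.index?_eq_none_iff ..).2 (by simpa using hmem)
          simp [hw1, pvVal_none hidx]
        · simp [hw1, hqp]
    rw [List.foldl_cons, ih w1 _ (fun q hq => hl q (List.mem_cons_of_mem _ hq)) hstep]
    apply List.map_congr_left
    intro q hq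
    have hval : pvVal codes sigs non w1 q = pvVal codes sigs non w q := by
      cases hidx : PySem.List.index? codes q.1 with
      | none =>
        rw [pvVal_none hidx, pvVal_none hidx]
        by_cases hqp : q = p
        · subst hqp; simp [hw1, pvVal_none hidx]
        · simp [hw1, hqp]
      | some i =>
        rw [pvVal_some hidx, pvVal_some hidx]
        by_cases hnon : (i : Int) ∈ non
        · by_cases hqp : q = p
          · subst hqp; simp [hw1, pvVal_some hidx, hnon]
          · simp [hw1, hqp, hnon]
        · simp [hnon]
    by_cases hql : q ∈ l
    · simp [hql, hval]
    · by_cases hqp : q = p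
      · subst hqp; simp [hql, hw1]
      · simp [hql, hqp, hw1]

-- B's loop over enumerate rest s
lemma pvB_loop (sigs : List String) (non : List Int) :
    ∀ (rest : List String) (s : Int) (seen : PySem.Set String) (w : String × String → String)
      (d : PySem.Dict String String),
    d.items = pvCodelist.map (fun q => (pvKey q, w q)) →
    (((PySem.List.enumerate rest s).foldl (fun st ic =>
        if PySem.Set.contains st.1 ic.2 then st
        else
          let seen := PySem.Set.add st.1 ic.2
          match (PySem.Dict.ofList pvCodelist : PySem.Dict String String).get? ic.2 with
          | some name =>
            if ic.1 ∈ non then (seen, st.2)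
            else (seen, st.2.insert (name ++ "_sig") ((PySem.List.pyGet? sigs ic.1).getD "0"))
          | none => (seen, st.2)) (seen, d)).2).items
      = pvCodelist.map (fun q => (pvKey q, pvValB sigs non s rest seen w q)) := by
  intro rest
  induction rest with
  | nil =>
    intro s seen w d hd
    rw [PySem.List.enumerate_nil, List.foldl_nil, hd]
    apply List.map_congr_left; intro q _
    by_cases hq1 : PySem.Set.contains seen q.1 = true
    · rw [pvValB_seen hq1]
    · rw [pvValB_unseen_none hq1 rfl]
  | cons x rest ih =>
    intro s seen w d hd
    rw [PySem.List.enumerate_cons, List.foldl_cons]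
    by_cases hx : PySem.Set.contains seen x = true
    · simp only [hx, if_true]
      rw [ih (s + 1) seen w d hd]
      apply List.map_congr_left; intro q _
      congr 1
      by_cases hq1 : PySem.Set.contains seen q.1 = true
      · rw [pvValB_seen hq1, pvValB_seen hq1]
      · have hqx : q.1 ≠ x := fun h => hq1 (h ▸ hx)
        exact (pvValB_cons_ne sigs non s x rest seen w q hqx).symm
    · simp only [hx, Bool.false_eq_true, if_false]
      cases hcl : (PySem.Dict.ofList pvCodelist : PySem.Dict String String).get? x with
      | none =>
        simp only [hcl]
        rw [ih (s + 1) (PySem.Set.add seen x) w d hd]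
        apply List.map_congr_left; intro q hq
        have hqx : q.1 ≠ x := by
          intro h
          have := pvCl_get_of_mem hq
          rw [h, hcl] at this; cases this
        have hca : PySem.Set.contains (PySem.Set.add seen x) q.1 = PySem.Set.contains seen q.1 := by
          rw [pvContains_add]; simp [hqx]
        congr 1
        by_cases hq1 : PySem.Set.contains seen q.1 = true
        · rw [pvValB_seen (hca.trans hq1), pvValB_seen hq1]
        · rw [pvValB_cons_ne sigs non s x rest seen w q hqx,
              pvValB_congr_seen sigs non (s+1) rest _ _ w q hca]
      | some name =>
        have hpx : (x, name) ∈ pvCodelist := pvCl_get x name hcl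
        by_cases hnon : s ∈ non
        · simp only [hcl, hnon, if_true]
          rw [ih (s + 1) (PySem.Set.add seen x) w d hd]
          apply List.map_congr_left; intro q hq
          congr 1
          by_cases hq1 : PySem.Set.contains seen q.1 = true
          · rw [pvValB_seen hq1, pvValB_seen (by rw [pvContains_add, hq1]; rfl)]
          · by_cases hqx : q.1 = x
            · rw [pvValB_seen (by rw [pvContains_add, hqx]; simp),
                  pvValB_unseen_some hq1 (by rw [hqx]; exact PySem.List.index?_cons_self ..)]
              simp [hnon]
            · have hca : PySem.Set.contains (PySem.Set.add seen x) q.1 = PySem.Set.contains seen q.1 := by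
                rw [pvContains_add]; simp [hqx]
              rw [pvValB_cons_ne sigs non s x rest seen w q hqx,
                  pvValB_congr_seen sigs non (s+1) rest _ _ w q hca]
        · simp only [hcl, hnon, if_false]
          have hd' := pvInsert_items [] sigs non w d hd hpx ((PySem.List.pyGet? sigs s).getD "0")
          rw [show name ++ "_sig" = pvKey (x, name) from rfl,
              ih (s + 1) (PySem.Set.add seen x)
                (fun q => if q = (x, name) then (PySem.List.pyGet? sigs s).getD "0" else w q) _ hd']
          apply List.map_congr_left; intro q hq
          congr 1
          by_cases hq1 : PySem.Set.contains seen q.1 = true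
          · have hqp : q ≠ (x, name) := by
              intro h; rw [h] at hq1; exact absurd hq1 (by simpa using hx)
            rw [pvValB_seen hq1, pvValB_seen (by rw [pvContains_add, hq1]; rfl)]
            simp [hqp]
          · by_cases hqx : q.1 = x
            · have hqp : q = (x, name) := pvFst_inj q hq (x, name) hpx hqx
              rw [pvValB_seen (by rw [pvContains_add, hqx]; simp),
                  pvValB_unseen_some hq1 (by rw [hqx]; exact PySem.List.index?_cons_self ..)]
              simp [hqp, hnon]
            · have hqp : q ≠ (x, name) := fun h => hqx (by rw [h])
              have hca : PySem.Set.contains (PySem.Set.add seen x) q.1 = PySem.Set.contains seen q.1 := by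
                rw [pvContains_add]; simp [hqx]
              rw [pvValB_cons_ne sigs non s x rest seen w q hqx,
                  pvValB_congr_w sigs non (s+1) rest _ _ w q (by simp [hqp]),
                  pvValB_congr_seen sigs non (s+1) rest _ seen w q hca]

-- ===== VERDICT (by name: the statement is the Claim_ definition above) =====
theorem parse_policy_markers_spec : Claim_equal_parse_policy_markers := by
  intro codes sigs non _
  unfold Spec_parse_policy_markers parse_policy_markers parse_policy_markers_alt
  by_cases hlen : codes.length = sigs.length
  · simp only [hlen, if_pos]
    rw [pvA_loop codes sigs non pvCodelist (fun _ => "0") _ (fun p hp => hp) (by decide),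
        pvB_loop sigs non codes 0 PySem.Set.empty (fun _ => "0") _ (by decide)]
    apply List.map_congr_left
    intro q hq
    simp only [pvVal, pvValB]
    have : q ∈ pvCodelist := hq
    simp only [this, if_pos]
    have hseen : PySem.Set.contains (PySem.Set.empty : PySem.Set String) q.1 = false := rfl
    simp only [hseen, Bool.false_eq_true, if_false]
    cases hidx : PySem.List.index? codes q.1 with
    | none => simp
    | some j =>
      have h0 : (0 : Int) + (j : Int) = (j : Int) := by ring
      simp [h0]
  · simp [hlen]
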